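-- pv_equiv track=rewrite | github.com/DHI-GRAS/seadas-ocssw-scripts | get_obpg_file_type.py | _get_l0_start_stop_times
-- ===== SOURCE A (Python) =====
-- def _get_l0_start_stop_times(l0_lines):
--     """
--     Returns the start time and stop time if found in l0_lines.
--     """
--     starttime = None
--     stoptime = None
--     for line in l0_lines:
--         if line.find('starttime') != -1:
--             starttime = line.strip().split('=')[1]
--         if line.find('stoptime') != -1:
--             stoptime = line.strip().split('=')[1]
--     return starttime, stoptime
-- ===== SOURCE B (Python) =====
-- def _get_l0_start_stop_times(l0_lines):
--     """
--     Returns the start time and stop time if found in l0_lines.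
--
--     For each keyword, scan backwards and return at the first (i.e. last overall)
--     matching line, instead of overwriting a variable on every match.
--     """
--     def last_value(keyword):
--         for line in reversed(l0_lines):
--             if line.find(keyword) != -1:
--                 return line.strip().split('=')[1]
--         return None
--     return last_value('starttime'), last_value('stoptime')
-- ===== Notes on version B (the rewrite author's own statement) =====
-- stated objective: alternative
-- what changed: Replaces A's forward scan that overwrites starttime/stoptime on every match with per-keyword backward scans that return at the first match from the end (= last match overall).
import Mathlib
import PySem

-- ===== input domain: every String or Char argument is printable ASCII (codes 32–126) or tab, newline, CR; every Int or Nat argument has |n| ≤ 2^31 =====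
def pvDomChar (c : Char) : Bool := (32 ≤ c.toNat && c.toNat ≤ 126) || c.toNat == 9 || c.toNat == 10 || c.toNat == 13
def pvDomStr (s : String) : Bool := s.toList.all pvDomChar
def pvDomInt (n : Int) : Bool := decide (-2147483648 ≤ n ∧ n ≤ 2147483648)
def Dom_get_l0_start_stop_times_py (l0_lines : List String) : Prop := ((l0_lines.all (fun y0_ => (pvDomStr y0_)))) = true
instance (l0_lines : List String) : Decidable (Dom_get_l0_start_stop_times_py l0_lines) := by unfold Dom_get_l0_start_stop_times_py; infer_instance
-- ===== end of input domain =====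

-- B replaces A's forward scan that overwrites each slot on every keyword match by per-keyword
-- backward scans that return at the first match from the end (objective: alternative).

-- ===== PORT A =====
-- subexpressions both Pythons share: the keyword tests and line.strip().split('=')[1]
def pvP1 (line : String) : Bool := PySem.Str.find line "starttime" != -1
def pvP2 (line : String) : Bool := PySem.Str.find line "stoptime" != -1
def pvExtract (line : String) : Option String :=
  -- split('=') with nonempty separator never raises, so split? here is always `some`;
  -- pyGet? _ 1 = none exactly where Python's [1] raises IndexError (excluded by Pre_)
  PySem.List.pyGet? ((PySem.Str.split? (PySem.Str.strip line) "=").getD []) 1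

-- A's loop body: overwrite a slot whenever its keyword occurs in the line
def pvStepA (acc : Option String × Option String) (line : String) : Option String × Option String :=
  (if pvP1 line then pvExtract line else acc.1,
   if pvP2 line then pvExtract line else acc.2)

def get_l0_start_stop_times_py (l0_lines : List String) : Option String × Option String :=
  l0_lines.foldl pvStepA (none, none)

-- ===== PORT B =====
-- Source B's last_value(keyword): scan the reversed list, return at the first matching line
def pvLastValue (keyword : String) : List String → Option String
  | [] => none
  | line :: rest =>
    if PySem.Str.find line keyword != -1 then pvExtract line else pvLastValue keyword rest

def get_l0_start_stop_times_py_alt (l0_lines : List String) : Option String × Option String :=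
  (pvLastValue "starttime" l0_lines.reverse, pvLastValue "stoptime" l0_lines.reverse)

-- ===== PRECONDITION & SPEC =====
def pvGood (line : String) : Bool :=
  decide (2 ≤ ((PySem.Str.split? (PySem.Str.strip line) "=").getD []).length)

-- Pre_ excludes exactly the inputs on which Python A raises IndexError: a line containing
-- 'starttime' or 'stoptime' whose stripped form contains no '=' (split('=')[1] out of range).
def Pre_get_l0_start_stop_times_py (l0_lines : List String) : Prop :=
  ∀ line ∈ l0_lines,
    (pvP1 line = true → pvGood line = true) ∧ (pvP2 line = true → pvGood line = true)
instance (l0_lines : List String) : Decidable (Pre_get_l0_start_stop_times_py l0_lines) := by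
  unfold Pre_get_l0_start_stop_times_py; infer_instance

def pvWitness_get_l0_start_stop_times_py : List String := ["starttime=2021", "stoptime=2022"]

def Spec_get_l0_start_stop_times_py (l0_lines : List String) (out : Option String × Option String) : Prop := out = get_l0_start_stop_times_py_alt l0_lines
instance (l0_lines : List String) (out : Option String × Option String) : Decidable (Spec_get_l0_start_stop_times_py l0_lines out) := by unfold Spec_get_l0_start_stop_times_py; infer_instance

-- ===== CLAIM (what is proved, stated in full; the proofs are below) =====
def Claim_equal_get_l0_start_stop_times_py : Prop := ∀ (l0_lines : List String), Dom_get_l0_start_stop_times_py l0_lines → Pre_get_l0_start_stop_times_py l0_lines → Spec_get_l0_start_stop_times_py l0_lines (get_l0_start_stop_times_py l0_lines)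

-- ===== LEMMAS AND PROOFS =====

-- appending one line changes "first match of the reversed list" exactly like A's overwrite
lemma last_step (p : String → Bool) (a : String) (l : List String) (st : Option String) :
    ((l.reverse ++ [a]).find? p).elim st pvExtract
      = (l.reverse.find? p).elim (if p a then pvExtract a else st) pvExtract := by
  rw [List.find?_append]
  cases h : l.reverse.find? p with
  | some x => simp [Option.or]
  | none => by_cases hp : p a = true <;> simp [Option.or, List.find?, hp]

-- A's fold leaves in each slot the extract of the LAST matching line (= first in reverse)
lemma foldA_eq (l : List String) (st sp : Option String) :
    l.foldl pvStepA (st, sp)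
      = ((l.reverse.find? pvP1).elim st pvExtract,
         (l.reverse.find? pvP2).elim sp pvExtract) := by
  induction l generalizing st sp with
  | nil => simp
  | cons a l ih =>
    rw [List.foldl_cons,
      show pvStepA (st, sp) a
          = ((if pvP1 a then pvExtract a else st), (if pvP2 a then pvExtract a else sp)) from rfl,
      ih, List.reverse_cons, last_step pvP1, last_step pvP2]

-- B's backward scan is exactly "first match of the list, then extract"
lemma lastValue_eq (kw : String) (l : List String) :
    pvLastValue kw l
      = (l.find? (fun line => PySem.Str.find line kw != -1)).bind pvExtract := by
  induction l with
  | nil => rfl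
  | cons a l ih =>
    rw [show pvLastValue kw (a :: l)
        = if (PySem.Str.find a kw != -1) = true then pvExtract a else pvLastValue kw l from rfl]
    by_cases hp : (PySem.Str.find a kw != -1) = true
    · rw [if_pos hp, List.find?_cons_of_pos (p := fun line => PySem.Str.find line kw != -1) hp,
        Option.bind_some]
    · rw [if_neg hp, List.find?_cons_of_neg (p := fun line => PySem.Str.find line kw != -1) hp, ih]

lemma elim_none_eq_bind (o : Option String) :
    o.elim (none : Option String) pvExtract = o.bind pvExtract := by
  cases o <;> rfl

-- ===== VERDICT (by name: the statement is the Claim_ definition above) =====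
theorem get_l0_start_stop_times_py_spec : Claim_equal_get_l0_start_stop_times_py := by
  intro l _hDom _hPre
  unfold Spec_get_l0_start_stop_times_py get_l0_start_stop_times_py get_l0_start_stop_times_py_alt
  rw [foldA_eq, lastValue_eq, lastValue_eq,
    show (fun line => PySem.Str.find line "starttime" != -1) = pvP1 from rfl,
    show (fun line => PySem.Str.find line "stoptime" != -1) = pvP2 from rfl,
    elim_none_eq_bind, elim_none_eq_bind]
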